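-- pv_equiv track=rewrite | github.com/younchoi/problem_solving | beads.py | processBeads
-- ===== SOURCE A (Python) =====
-- class ListPipe:
--     '''
--     List를 이용하여 다음의 method들을 작성하세요.
--     '''
--     def __init__(self) :
--         '''
--         리스트 myPipe를 만듭니다. 이는 구슬의 배치를 저장합니다.
--         '''
--         self.myPipe = []
--         pass
--
--     def addLeft(self, n) :
--         '''
--         파이프의 왼쪽으로 구슬 n을 삽입합니다.
--         '''
--         self.myPipe.insert(0,n) #0번째 위치에 n을 넣는다!
--         pass
--
--     def addRight(self, n) :
--         '''
--         파이프의 오른쪽으로 구슬 n을 삽입합니다.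
--         '''
--         self.myPipe.append(n) #맨 오른쪽에 n 구술
--         pass
--
--     def getBeads(self) :
--         '''
--         파이프의 배치를 list로 반환합니다.
--         '''
--         return self.myPipe
--
-- def processBeads(myInput) :
--     '''
--     구슬을 파이프에 넣는 행위가 myInput으로 주어질 때, 구슬의 최종 배치를 리스트로 반환하는 함수를 작성하세요.
--
--     myInput[i][0] : i번째에 넣는 구슬의 번호
--     myInput[i][1] : i번째에 넣는 방향
--
--     예를 들어, 예제의 경우
--
--     myInput[0][0] = 1, myInput[0][1] = 0,
--     myInput[1][0] = 2, myInput[1][1] = 1,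
--     myInput[2][0] = 3, myInput[2][1] = 0
--
--     입니다.
--
--     '''
--
--     myPipe = ListPipe()
--
--     for bead, direction in myInput :
--
--         if direction == 0:
--             myPipe.addLeft(bead)
--
--         elif direction == 1:
--             myPipe.addRight(bead)
--
--
--     result = myPipe.getBeads()
--
--     return result
-- ===== SOURCE B (Python) =====
-- def processBeads(myInput):
--     left = []
--     right = []
--     for bead, direction in myInput:
--         if direction == 0:
--             left.append(bead)
--         elif direction == 1:
--             right.append(bead)
--     return left[::-1] + right
-- ===== Notes on version B (the rewrite author's own statement) =====
-- stated objective: simpler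
-- what changed: Replaces the pipe simulated by front/back insertions with a single pass into two buckets, returning reversed-left ++ right.
import Mathlib
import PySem

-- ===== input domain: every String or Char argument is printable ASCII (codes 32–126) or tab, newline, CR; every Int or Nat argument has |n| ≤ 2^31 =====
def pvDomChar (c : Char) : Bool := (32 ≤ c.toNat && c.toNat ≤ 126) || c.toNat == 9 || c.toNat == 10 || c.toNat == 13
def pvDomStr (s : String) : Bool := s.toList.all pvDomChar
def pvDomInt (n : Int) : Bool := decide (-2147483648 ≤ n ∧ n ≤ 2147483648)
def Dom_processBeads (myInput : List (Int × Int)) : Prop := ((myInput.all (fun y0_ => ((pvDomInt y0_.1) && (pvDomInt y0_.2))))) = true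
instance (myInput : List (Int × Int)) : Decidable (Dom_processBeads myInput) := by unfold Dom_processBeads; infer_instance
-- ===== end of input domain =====

-- B replaces the simulated pipe (front/back insertions) with one pass into two buckets,
-- returning reversed-left ++ right.

-- ===== PORT A =====
-- A's loop over the ListPipe: addLeft = insert at 0, addRight = append
def processBeads (myInput : List (Int × Int)) : List Int :=
  myInput.foldl (fun pipe bd =>
    if bd.2 == 0 then bd.1 :: pipe
    else if bd.2 == 1 then pipe ++ [bd.1]
    else pipe) []

-- ===== PORT B =====
-- one pass collecting two buckets, then left[::-1] + right
def processBeads_alt (myInput : List (Int × Int)) : List Int :=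
  let lr := myInput.foldl (fun (lr : List Int × List Int) bd =>
    if bd.2 == 0 then (lr.1 ++ [bd.1], lr.2)
    else if bd.2 == 1 then (lr.1, lr.2 ++ [bd.1])
    else lr) ([], [])
  lr.1.reverse ++ lr.2

-- ===== PRECONDITION & SPEC =====
def Spec_processBeads (myInput : List (Int × Int)) (out : List Int) : Prop := out = processBeads_alt myInput
instance (myInput : List (Int × Int)) (out : List Int) : Decidable (Spec_processBeads myInput out) := by unfold Spec_processBeads; infer_instance

-- ===== CLAIM (what is proved, stated in full; the proofs are below) =====
def Claim_equal_processBeads : Prop := ∀ (myInput : List (Int × Int)), Dom_processBeads myInput → Spec_processBeads myInput (processBeads myInput)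

-- ===== LEMMAS AND PROOFS =====
theorem processBeads_inv (xs : List (Int × Int)) (l r : List Int) :
    xs.foldl (fun pipe bd =>
      if bd.2 == 0 then bd.1 :: pipe
      else if bd.2 == 1 then pipe ++ [bd.1]
      else pipe) (l.reverse ++ r)
    = (xs.foldl (fun (lr : List Int × List Int) bd =>
        if bd.2 == 0 then (lr.1 ++ [bd.1], lr.2)
        else if bd.2 == 1 then (lr.1, lr.2 ++ [bd.1])
        else lr) (l, r)).1.reverse
      ++ (xs.foldl (fun (lr : List Int × List Int) bd =>
        if bd.2 == 0 then (lr.1 ++ [bd.1], lr.2)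
        else if bd.2 == 1 then (lr.1, lr.2 ++ [bd.1])
        else lr) (l, r)).2 := by
  induction xs generalizing l r with
  | nil => simp
  | cons bd xs ih =>
    simp only [List.foldl_cons]
    by_cases h0 : bd.2 == 0
    · simp only [h0, if_pos]
      have : bd.1 :: (l.reverse ++ r) = (l ++ [bd.1]).reverse ++ r := by simp
      rw [this, ih]
    · simp only [h0, if_neg, Bool.not_eq_true] at *
      by_cases h1 : bd.2 == 1
      · simp only [h0, h1, if_neg, if_pos, Bool.false_eq_true, not_false_iff]
        have : (l.reverse ++ r) ++ [bd.1] = l.reverse ++ (r ++ [bd.1]) := by simp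
        rw [this, ih]
      · simp only [h0, h1, Bool.false_eq_true, if_neg, not_false_iff]
        exact ih l r

-- ===== VERDICT (by name: the statement is the Claim_ definition above) =====
theorem processBeads_spec : Claim_equal_processBeads := by
  intro xs _
  unfold Spec_processBeads processBeads processBeads_alt
  simpa using processBeads_inv xs [] []
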